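-- pv_equiv track=rewrite | github.com/ping-y/SAGL | SAGL_local/_1_data_process.py | get_edge_num
-- ===== SOURCE A (Python) =====
-- def get_edge_num(x,sign_RRs):
--     x=list(x)
--     count=0
--     for i in range(len(x)-1):
--         for j in range(i+1,len(x)):
--             if [x[i],x[j]] in sign_RRs or [x[j],x[i]] in sign_RRs:
--                 count+=1
--     return count
-- ===== SOURCE B (Python) =====
-- def get_edge_num(x, sign_RRs):
--     cnt = {}
--     for v in x:
--         cnt[v] = cnt.get(v, 0) + 1
--     edges = set()
--     for e in sign_RRs:
--         if len(e) == 2: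
--             u, v = e
--             edges.add((u, v) if u <= v else (v, u))
--     total = 0
--     for (u, v) in edges:
--         if u == v:
--             c = cnt.get(u, 0)
--             total += c * (c - 1) // 2
--         else:
--             total += cnt.get(u, 0) * cnt.get(v, 0)
--     return total
-- ===== Notes on version B (the rewrite author's own statement) =====
-- stated objective: faster
-- what changed: Replaces the O(n^2) scan over all index pairs (each with a linear membership test in sign_RRs) by a value Counter plus a deduplicated set of unordered edges, summing cnt[u]*cnt[v] per distinct edge and C(cnt[u],2) per self-loop.
import Mathlib
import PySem

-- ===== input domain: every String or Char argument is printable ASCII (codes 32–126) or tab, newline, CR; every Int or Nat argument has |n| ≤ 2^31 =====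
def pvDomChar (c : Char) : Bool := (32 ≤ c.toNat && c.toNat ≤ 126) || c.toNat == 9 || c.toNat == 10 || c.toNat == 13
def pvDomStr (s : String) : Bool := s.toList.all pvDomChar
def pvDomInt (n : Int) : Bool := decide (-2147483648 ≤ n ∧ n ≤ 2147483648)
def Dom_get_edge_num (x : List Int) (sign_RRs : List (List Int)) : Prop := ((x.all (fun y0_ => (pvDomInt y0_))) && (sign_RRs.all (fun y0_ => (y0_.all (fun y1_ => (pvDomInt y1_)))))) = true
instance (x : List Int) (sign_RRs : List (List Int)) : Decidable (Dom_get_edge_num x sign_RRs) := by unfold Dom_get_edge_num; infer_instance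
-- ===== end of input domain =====

-- B replaces A's quadratic scan over index pairs by a value counter and a
-- deduplicated set of unordered edges (objective: faster; measured by the check).

-- ===== PORT A =====
def get_edge_num (x : List Int) (sign_RRs : List (List Int)) : Int :=
  -- for i in range(len(x)-1): for j in range(i+1, len(x)): if [x[i],x[j]] in sign_RRs or [x[j],x[i]] in sign_RRs: count += 1
  (PySem.List.pyRange 0 ((x.length : Int) - 1)).foldl (fun count i =>
    (PySem.List.pyRange (i + 1) (x.length : Int)).foldl (fun count j =>
      if [PySem.List.pyGetD x i 0, PySem.List.pyGetD x j 0] ∈ sign_RRs ∨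
         [PySem.List.pyGetD x j 0, PySem.List.pyGetD x i 0] ∈ sign_RRs
      then count + 1 else count) count) 0

-- ===== PORT B =====
-- (u, v) if u <= v else (v, u)
def pvNorm (u v : Int) : Int × Int := if u ≤ v then (u, v) else (v, u)

def get_edge_num_alt (x : List Int) (sign_RRs : List (List Int)) : Int :=
  -- cnt[v] = cnt.get(v, 0) + 1
  let cnt : PySem.Dict Int Int :=
    x.foldl (fun d v => d.insert v (d.getD v 0 + 1)) PySem.Dict.empty
  -- if len(e) == 2: u, v = e; edges.add((u, v) if u <= v else (v, u))
  let edges : PySem.Set (Int × Int) :=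
    sign_RRs.foldl (fun s e =>
      match e with
      | [u, v] => s.add (pvNorm u v)
      | _ => s) (PySem.Set.ofList [])
  -- total += c*(c-1)//2 on a self-loop, else cnt[u]*cnt[v]
  edges.foldl (fun total uv =>
    if uv.1 = uv.2 then
      total + PySem.Int.floordiv (cnt.getD uv.1 0 * (cnt.getD uv.1 0 - 1)) 2
    else
      total + cnt.getD uv.1 0 * cnt.getD uv.2 0) 0

-- ===== PRECONDITION & SPEC =====
def Spec_get_edge_num (x : List Int) (sign_RRs : List (List Int)) (out : Int) : Prop := out = get_edge_num_alt x sign_RRs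
instance (x : List Int) (sign_RRs : List (List Int)) (out : Int) : Decidable (Spec_get_edge_num x sign_RRs out) := by unfold Spec_get_edge_num; infer_instance

-- ===== CLAIM (what is proved, stated in full; the proofs are below) =====
def Claim_equal_get_edge_num : Prop := ∀ (x : List Int) (sign_RRs : List (List Int)), Dom_get_edge_num x sign_RRs → Spec_get_edge_num x sign_RRs (get_edge_num x sign_RRs)

-- ===== LEMMAS AND PROOFS =====

-- edge predicate of A's inner test
def edgeP (s : List (List Int)) (u v : Int) : Bool := decide ([u, v] ∈ s ∨ [v, u] ∈ s)

-- structural form of A's double loop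
def gcount (s : List (List Int)) : List Int → Int
  | [] => 0
  | h :: t => ((t.countP (edgeP s h) : Nat) : Int) + gcount s t

-- same, membership in an edge list instead of edgeP
def gE (E : List (Int × Int)) : List Int → Int
  | [] => 0
  | h :: t => ((t.countP (fun v => decide (pvNorm h v ∈ E)) : Nat) : Int) + gE E t

-- per-edge weight of B's final loop
def wfun (x : List Int) (p : Int × Int) : Int :=
  if p.1 = p.2 then PySem.Int.floordiv (((x.count p.1 : Nat) : Int) * (((x.count p.1 : Nat) : Int) - 1)) 2
  else ((x.count p.1 : Nat) : Int) * ((x.count p.2 : Nat) : Int)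

-- B's edge-building step
def stepE (s0 : PySem.Set (Int × Int)) (e : List Int) : PySem.Set (Int × Int) :=
  match e with
  | [u, v] => s0.add (pvNorm u v)
  | _ => s0

lemma pyRange_nil {a b : Int} (h : b ≤ a) : PySem.List.pyRange a b = [] := by
  simp [PySem.List.pyRange, show ¬ a < b by omega]

lemma pyRange_natCast (n a : Nat) :
    PySem.List.pyRange (a : Int) ((a : Int) + (n : Int)) = (List.range' a n).map (fun k : Nat => (k : Int)) := by
  induction n generalizing a with
  | zero =>
      rw [show ((0 : Nat) : Int) = 0 from rfl, add_zero, pyRange_nil le_rfl]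
      rfl
  | succ m ih =>
      rw [PySem.List.pyRange_one_cons (by omega), List.range'_succ]
      simp only [List.map_cons]
      congr 1
      have h1 : (a : Int) + 1 = ((a + 1 : Nat) : Int) := by push_cast; ring
      have h2 : (a : Int) + ((m + 1 : Nat) : Int) = ((a + 1 : Nat) : Int) + (m : Int) := by push_cast; ring
      rw [h1, h2, ih (a + 1)]

lemma foldl_if_prop (P : Int → Prop) [DecidablePred P] (l : List Int) (a : Int) :
    l.foldl (fun c j => if P j then c + 1 else c) a = a + ((l.countP (fun j => decide (P j)) : Nat) : Int) := by
  rw [← PySem.List.foldl_count_if (fun j => decide (P j)) l a]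
  congr 1
  funext c j
  by_cases h : P j <;> simp [h]

lemma countP_range'_drop (p : Int → Bool) :
    ∀ (m s : Nat) (x : List Int), s + m = x.length →
      (List.range' s m).countP (fun j => p (x.getD j 0)) = (x.drop s).countP p := by
  intro m
  induction m with
  | zero =>
      intro s x h
      have hs : s = x.length := by omega
      rw [hs, List.drop_length]
      simp
  | succ k ih =>
      intro s x h
      rw [List.range'_succ, List.countP_cons]
      have hs : s < x.length := by omega
      rw [List.drop_eq_getElem_cons hs, List.countP_cons]
      have hgetD : x.getD s 0 = x[s] := by
        rw [List.getD_eq_getElem?_getD, List.getElem?_eq_getElem hs]; rfl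
      rw [hgetD, ih (s + 1) x (by omega)]

-- A's loops compute gcount
lemma lemA (x : List Int) (s : List (List Int)) : get_edge_num x s = gcount s x := by
  have hbody : get_edge_num x s =
      ((PySem.List.pyRange 0 ((x.length : Int) - 1)).map (fun i =>
        (((PySem.List.pyRange (i + 1) (x.length : Int)).countP
          (fun j => edgeP s (PySem.List.pyGetD x i 0) (PySem.List.pyGetD x j 0)) : Nat) : Int))).sum := by
    unfold get_edge_num
    have h1 : (fun (count : Int) (i : Int) =>
        (PySem.List.pyRange (i + 1) (x.length : Int)).foldl (fun count j =>
          if [PySem.List.pyGetD x i 0, PySem.List.pyGetD x j 0] ∈ s ∨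
             [PySem.List.pyGetD x j 0, PySem.List.pyGetD x i 0] ∈ s
          then count + 1 else count) count) =
        (fun (count : Int) (i : Int) => count +
          (((PySem.List.pyRange (i + 1) (x.length : Int)).countP
            (fun j => edgeP s (PySem.List.pyGetD x i 0) (PySem.List.pyGetD x j 0)) : Nat) : Int)) := by
      funext count i
      rw [foldl_if_prop (fun j => [PySem.List.pyGetD x i 0, PySem.List.pyGetD x j 0] ∈ s ∨
             [PySem.List.pyGetD x j 0, PySem.List.pyGetD x i 0] ∈ s)]
      rfl
    rw [h1, PySem.List.foldl_add]
    simp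
  rw [hbody]
  clear hbody
  -- reduce to a Nat-indexed sum, then induct on x
  have main : ∀ (y : List Int),
      ((List.range (y.length - 1)).map (fun i =>
        (((y.drop (i + 1)).countP (edgeP s (y.getD i 0)) : Nat) : Int))).sum = gcount s y := by
    intro y
    induction y with
    | nil => simp [gcount]
    | cons h t iht =>
        rcases t with _ | ⟨b, t'⟩
        · simp [gcount]
        · set t := b :: t' with ht
          have hlen : (h :: t).length - 1 = (t.length - 1) + 1 := by simp [ht]
          rw [hlen, List.range_succ_eq_map, List.map_cons, List.sum_cons, List.map_map]
          have h0 : (((((h :: t).drop (0 + 1)).countP (edgeP s ((h :: t).getD 0 0)) : Nat)) : Int) =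
              ((t.countP (edgeP s h) : Nat) : Int) := by simp
          calc ((((h :: t).drop (0 + 1)).countP (edgeP s ((h :: t).getD 0 0)) : Nat) : Int) +
                ((List.range (t.length - 1)).map
                  ((fun i => ((((h :: t).drop (i + 1)).countP (edgeP s ((h :: t).getD i 0)) : Nat) : Int)) ∘ Nat.succ)).sum
              = ((t.countP (edgeP s h) : Nat) : Int) +
                ((List.range (t.length - 1)).map (fun i =>
                  (((t.drop (i + 1)).countP (edgeP s (t.getD i 0)) : Nat) : Int))).sum := by
                rw [h0]
                congr 1
            _ = gcount s (h :: t) := by rw [iht]; rfl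
  rcases x with _ | ⟨a, t⟩
  · rw [show ((([] : List Int).length : Int) - 1) = -1 from rfl, pyRange_nil (by norm_num)]
    rfl
  · set x := a :: t with hx
    have hlen : ((x.length : Int) - 1) = ((x.length - 1 : Nat) : Int) := by
      simp [hx]
    rw [hlen, PySem.List.pyRange_zero_natCast]
    rw [← main x]
    simp only [List.map_map]
    congr 1
    apply List.map_congr_left
    intro i hi
    rw [List.mem_range] at hi
    simp only [Function.comp_apply]
    have hcast : ((i : Int) + 1) = ((i + 1 : Nat) : Int) := by push_cast; ring
    have hlen2 : ((x.length : Nat) : Int) = ((i + 1 : Nat) : Int) + ((x.length - (i + 1) : Nat) : Int) := by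
      push_cast; omega
    rw [hcast, hlen2, pyRange_natCast, List.countP_map]
    have hcnt : (List.range' (i + 1) (x.length - (i + 1))).countP
        ((fun j => edgeP s (PySem.List.pyGetD x (i : Int) 0) (PySem.List.pyGetD x j 0)) ∘ (fun k : Nat => (k : Int))) =
        (x.drop (i + 1)).countP (edgeP s (x.getD i 0)) := by
      rw [← countP_range'_drop (edgeP s (x.getD i 0)) (x.length - (i + 1)) (i + 1) x (by omega)]
      apply List.countP_congr
      intro j _
      simp [Function.comp, PySem.List.pyGetD_natCast]
    rw [hcnt]

-- counter lemma
lemma cntLem : ∀ (x : List Int) (d : PySem.Dict Int Int) (v : Int),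
    (x.foldl (fun d v => d.insert v (d.getD v 0 + 1)) d).getD v 0 = d.getD v 0 + ((x.count v : Nat) : Int) := by
  intro x
  induction x with
  | nil => intro d v; simp
  | cons h t ih =>
      intro d v
      rw [List.foldl_cons, ih, PySem.Dict.getD_insert, List.count_cons]
      by_cases hv : v = h
      · subst hv
        rw [if_pos rfl, if_pos (by simp)]
        push_cast
        ring
      · rw [if_neg hv, if_neg (show ¬ ((h == v) = true) by simp only [beq_iff_eq]; omega)]
        push_cast
        ring

-- membership in the built edge set
lemma memE : ∀ (l : List (List Int)) (s0 : PySem.Set (Int × Int)) (p : Int × Int),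
    p ∈ l.foldl stepE s0 ↔ p ∈ s0 ∨ ∃ u v, [u, v] ∈ l ∧ pvNorm u v = p := by
  intro l
  induction l with
  | nil => intro s0 p; simp
  | cons e l ih =>
      intro s0 p
      rw [List.foldl_cons, ih]
      have hstep : p ∈ stepE s0 e ↔ p ∈ s0 ∨ ∃ u v, e = [u, v] ∧ pvNorm u v = p := by
        rcases e with _ | ⟨u, _ | ⟨v, _ | ⟨w, rest⟩⟩⟩
        · simp [stepE]
        · simp [stepE]
        · rw [show stepE s0 [u, v] = s0.add (pvNorm u v) from rfl, PySem.Set.mem_add]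
          constructor
          · rintro (h | h)
            · exact Or.inl h
            · exact Or.inr ⟨u, v, rfl, h.symm⟩
          · rintro (h | ⟨u', v', heq, h3⟩)
            · exact Or.inl h
            · obtain ⟨rfl, rfl⟩ : u = u' ∧ v = v' := by simpa using heq
              exact Or.inr h3.symm
        · simp [stepE]
      rw [hstep]
      constructor
      · rintro ((h | ⟨u, v, he, hn⟩) | ⟨u, v, hm, hn⟩)
        · exact Or.inl h
        · exact Or.inr ⟨u, v, by simp [he], hn⟩
        · exact Or.inr ⟨u, v, List.mem_cons_of_mem _ hm, hn⟩
      · rintro (h | ⟨u, v, hm, hn⟩)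
        · exact Or.inl (Or.inl h)
        · rcases List.mem_cons.mp hm with h1 | h1
          · exact Or.inl (Or.inr ⟨u, v, h1.symm, hn⟩)
          · exact Or.inr ⟨u, v, h1, hn⟩

lemma nodupE : ∀ (l : List (List Int)) (s0 : PySem.Set (Int × Int)),
    List.Nodup s0 → List.Nodup (l.foldl stepE s0) := by
  intro l
  induction l with
  | nil => intro s0 h; exact h
  | cons e l ih =>
      intro s0 h
      rw [List.foldl_cons]
      apply ih
      rcases e with _ | ⟨u, _ | ⟨v, _ | ⟨w, rest⟩⟩⟩
      · exact h
      · exact h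
      · exact PySem.Set.nodup_add _ _ h
      · exact h

lemma pvNorm_fst_le (u v : Int) : (pvNorm u v).1 ≤ (pvNorm u v).2 := by
  unfold pvNorm; split_ifs <;> simp <;> omega

lemma pvNorm_comm (u v : Int) : pvNorm u v = pvNorm v u := by
  unfold pvNorm; split_ifs <;> simp only [Prod.mk.injEq] <;> omega

lemma pvNorm_inj {a b u v : Int} (h : pvNorm a b = pvNorm u v) :
    (a = u ∧ b = v) ∨ (a = v ∧ b = u) := by
  unfold pvNorm at h; split_ifs at h <;> simp only [Prod.mk.injEq] at h <;> omega

lemma pvNorm_eq_iff {a b : Int} (hab : a ≤ b) (h v : Int) :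
    pvNorm h v = (a, b) ↔ (h = a ∧ v = b) ∨ (h = b ∧ v = a) := by
  unfold pvNorm; split_ifs <;> simp only [Prod.mk.injEq] <;> omega

-- collapse a nodup sum of indicators
lemma sum_indicator (y : Int × Int) : ∀ (E : List (Int × Int)), E.Nodup →
    (E.map (fun e => if y = e then (1 : Int) else 0)).sum = if y ∈ E then (1 : Int) else 0 := by
  intro E
  induction E with
  | nil => simp
  | cons e E ih =>
      intro hnd
      rw [List.nodup_cons] at hnd
      rw [List.map_cons, List.sum_cons, ih hnd.2]
      by_cases hy : y = e
      · subst hy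
        simp [hnd.1]
      · simp [hy]

lemma sum_countP_eq (h : Int) (E : List (Int × Int)) (hE : E.Nodup) :
    ∀ (t : List Int), (E.map (fun e => ((t.countP (fun v => decide (pvNorm h v = e)) : Nat) : Int))).sum =
      ((t.countP (fun v => decide (pvNorm h v ∈ E)) : Nat) : Int) := by
  intro t
  induction t with
  | nil => simp
  | cons v t iht =>
      have hsplit : (fun e => (((v :: t).countP (fun w => decide (pvNorm h w = e)) : Nat) : Int)) =
          (fun e => ((t.countP (fun w => decide (pvNorm h w = e)) : Nat) : Int) +
            (if pvNorm h v = e then (1 : Int) else 0)) := by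
        funext e
        rw [List.countP_cons]
        by_cases hv : pvNorm h v = e <;> simp [hv]
      rw [hsplit, PySem.List.sum_map_add_int, iht, sum_indicator (pvNorm h v) E hE,
          List.countP_cons]
      by_cases hm : pvNorm h v ∈ E <;> simp [hm]

-- per-edge difference when one element is prepended
lemma wstep (h : Int) (t : List Int) (p : Int × Int) (hle : p.1 ≤ p.2) :
    wfun (h :: t) p = wfun t p + ((t.countP (fun v => decide (pvNorm h v = p)) : Nat) : Int) := by
  rcases p with ⟨a, b⟩
  simp only at hle
  have hcnt : ∀ z : Int, ((h :: t).count z : Int) = (t.count z : Int) + (if h = z then 1 else 0) := by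
    intro z
    rw [List.count_cons]
    by_cases hz : h = z
    · rw [if_pos (show (h == z) = true by simp [hz]), if_pos hz]
      push_cast
      ring
    · rw [if_neg (show ¬ ((h == z) = true) by simp only [beq_iff_eq]; omega), if_neg hz]
      push_cast
      ring
  by_cases hab : a = b
  · subst hab
    simp only [wfun]
    have hiff : ∀ v : Int, (pvNorm h v = (a, a)) ↔ (h = a ∧ v = a) := by
      intro v
      rw [pvNorm_eq_iff (le_refl a)]
      tauto
    by_cases hha : h = a
    · subst hha
      have hcp : t.countP (fun v => decide (pvNorm h v = (h, h))) = t.count h := by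
        rw [List.count_eq_countP]
        apply List.countP_congr
        intro v _
        simp only [decide_eq_true_eq, beq_iff_eq]
        rw [hiff v]
        constructor
        · rintro ⟨_, hv⟩; exact hv
        · intro hv; exact ⟨rfl, hv⟩
      rw [hcp, hcnt h, if_pos rfl]
      set c : Int := (t.count h : Int) with hc
      have hc0 : 0 ≤ c := hc ▸ Int.natCast_nonneg _
      rw [PySem.Int.floordiv_eq_ediv_of_pos (by norm_num), PySem.Int.floordiv_eq_ediv_of_pos (by norm_num)]
      have : (c + 1) * (c + 1 - 1) = c * (c - 1) + c * 2 := by ring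
      rw [this, Int.add_mul_ediv_right _ _ (by norm_num)]
      simp
    · have hcp : t.countP (fun v => decide (pvNorm h v = (a, a))) = 0 := by
        rw [List.countP_eq_zero]
        intro v _
        simp [hiff v, hha]
      rw [hcp, hcnt a, if_neg hha]
      simp
  · have hlt : a < b := lt_of_le_of_ne hle hab
    simp only [wfun, if_neg hab]
    have hiff : ∀ v : Int, (pvNorm h v = (a, b)) ↔ (h = a ∧ v = b) ∨ (h = b ∧ v = a) :=
      fun v => pvNorm_eq_iff hle h v
    rw [hcnt a, hcnt b]
    by_cases hha : h = a
    · subst hha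
      have hcp : t.countP (fun v => decide (pvNorm h v = (h, b))) = t.count b := by
        rw [List.count_eq_countP]
        apply List.countP_congr
        intro v _
        simp only [decide_eq_true_eq, beq_iff_eq]
        rw [hiff v]
        constructor
        · rintro (⟨_, hv⟩ | ⟨hh, _⟩)
          · exact hv
          · omega
        · intro hv; exact Or.inl ⟨rfl, hv⟩
      rw [hcp, if_pos rfl, if_neg (by omega)]
      ring
    · by_cases hhb : h = b
      · subst hhb
        have hcp : t.countP (fun v => decide (pvNorm h v = (a, h))) = t.count a := by
          rw [List.count_eq_countP]
          apply List.countP_congr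
          intro v _
          simp only [decide_eq_true_eq, beq_iff_eq]
          rw [hiff v]
          constructor
          · rintro (⟨hh, _⟩ | ⟨_, hv⟩)
            · omega
            · exact hv
          · intro hv; exact Or.inr ⟨rfl, hv⟩
        rw [hcp, if_neg hha, if_pos rfl]
        ring
      · have hcp : t.countP (fun v => decide (pvNorm h v = (a, b))) = 0 := by
          rw [List.countP_eq_zero]
          intro v _
          simp only [decide_eq_true_eq]
          rw [hiff v]
          rintro (⟨hh, _⟩ | ⟨hh, _⟩) <;> omega
        rw [hcp, if_neg hha, if_neg hhb]
        push_cast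
        ring

-- gcount through the deduplicated edge list
lemma lemM (E : List (Int × Int)) (hE : E.Nodup) (hle : ∀ p ∈ E, p.1 ≤ p.2) :
    ∀ (x : List Int), gE E x = (E.map (wfun x)).sum := by
  intro x
  induction x with
  | nil =>
      simp only [gE]
      symm
      apply List.sum_eq_zero
      intro z hz
      rw [List.mem_map] at hz
      obtain ⟨p, _, hp⟩ := hz
      rw [← hp]
      rcases p with ⟨a, b⟩
      by_cases hab : a = b <;> simp [wfun, hab]
  | cons h t iht =>
      simp only [gE]
      rw [iht]
      have hmap : E.map (wfun (h :: t)) =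
          E.map (fun e => wfun t e + ((t.countP (fun v => decide (pvNorm h v = e)) : Nat) : Int)) := by
        apply List.map_congr_left
        intro p hp
        exact wstep h t p (hle p hp)
      rw [hmap, PySem.List.sum_map_add_int, sum_countP_eq h E hE t]
      ring

-- B unfolds to the weighted sum over its edge list
lemma lemB (x : List Int) (s : List (List Int)) :
    get_edge_num_alt x s = ((s.foldl stepE (PySem.Set.ofList [])).map (wfun x)).sum := by
  unfold get_edge_num_alt
  dsimp only
  have hstep : (fun (s0 : PySem.Set (Int × Int)) (e : List Int) =>
      match e with
      | [u, v] => s0.add (pvNorm u v)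
      | _ => s0) = stepE := by
    funext s0 e
    rcases e with _ | ⟨u, _ | ⟨v, _ | ⟨w, rest⟩⟩⟩ <;> rfl
  rw [hstep]
  have hc : ∀ v : Int,
      (x.foldl (fun d v => d.insert v (d.getD v 0 + 1)) PySem.Dict.empty).getD v 0 = ((x.count v : Nat) : Int) := by
    intro v
    rw [cntLem x PySem.Dict.empty v]
    simp [PySem.Dict.getD, PySem.Dict.get?_empty]
  have hfun : (fun (total : Int) (uv : Int × Int) =>
      if uv.1 = uv.2 then
        total + PySem.Int.floordiv
          ((x.foldl (fun d v => d.insert v (d.getD v 0 + 1)) PySem.Dict.empty).getD uv.1 0 *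
            ((x.foldl (fun d v => d.insert v (d.getD v 0 + 1)) PySem.Dict.empty).getD uv.1 0 - 1)) 2
      else
        total + (x.foldl (fun d v => d.insert v (d.getD v 0 + 1)) PySem.Dict.empty).getD uv.1 0 *
          (x.foldl (fun d v => d.insert v (d.getD v 0 + 1)) PySem.Dict.empty).getD uv.2 0) =
      (fun (total : Int) (uv : Int × Int) => total + wfun x uv) := by
    funext total uv
    by_cases huv : uv.1 = uv.2 <;> simp [huv, wfun, hc]
  rw [hfun, PySem.List.foldl_add]
  simp

-- transfer gcount to gE for B's edge list
lemma gcount_eq_gE (s : List (List Int)) :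
    ∀ (x : List Int), gcount s x = gE (s.foldl stepE (PySem.Set.ofList [])) x := by
  have hlink : ∀ u v : Int, edgeP s u v = true ↔ pvNorm u v ∈ s.foldl stepE (PySem.Set.ofList []) := by
    intro u v
    rw [memE]
    simp only [edgeP, decide_eq_true_eq]
    constructor
    · rintro (h | h)
      · exact Or.inr ⟨u, v, h, rfl⟩
      · exact Or.inr ⟨v, u, h, pvNorm_comm v u⟩
    · rintro (h | ⟨a, b, hm, hn⟩)
      · simp [PySem.Set.ofList] at h
      · rcases pvNorm_inj hn with ⟨h1, h2⟩ | ⟨h1, h2⟩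
        · subst h1; subst h2; exact Or.inl hm
        · subst h1; subst h2; exact Or.inr hm
  intro x
  induction x with
  | nil => rfl
  | cons h t iht =>
      simp only [gcount, gE]
      rw [iht]
      congr 2
      apply List.countP_congr
      intro v _
      simp only [decide_eq_true_eq]
      rw [← hlink h v]



-- ===== VERDICT (by name: the statement is the Claim_ definition above) =====
theorem get_edge_num_spec : Claim_equal_get_edge_num := by
  intro x s _
  unfold Spec_get_edge_num
  rw [lemA x s, lemB x s, gcount_eq_gE s x]
  exact lemM _ (nodupE s _ (by simp [PySem.Set.ofList])) (by
    intro p hp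
    rw [memE] at hp
    rcases hp with h | ⟨u, v, _, hn⟩
    · simp [PySem.Set.ofList] at h
    · rw [← hn]; exact pvNorm_fst_le u v) x
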